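-- pv_equiv track=rewrite | github.com/Imcaicai/FCS | url/code/tool/feature.py | get_deli_num
-- ===== SOURCE A (Python) =====
-- def get_deli_num(url):
--     deli = ['-', '_', '?', '=', '&']
--     count = 0
--     for i in url:
--         for j in deli:
--             if i == j:
--                 count += 1
--     return count
-- ===== SOURCE B (Python) =====
-- def get_deli_num(url):
--     # Count by deletion: remove every delimiter character, then the number of
--     # delimiters is the length lost.
--     return len(url) - len(url.translate(str.maketrans('', '', '-_?=&')))
-- ===== Notes on version B (the rewrite author's own statement) =====
-- stated objective: alternative
-- what changed: Counts by deletion instead of tallying: B strips the five delimiter characters with str.translate and returns the length difference, maintaining no counter and doing no per-delimiter comparison loop (measured faster via the C-level translate).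
import Mathlib
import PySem

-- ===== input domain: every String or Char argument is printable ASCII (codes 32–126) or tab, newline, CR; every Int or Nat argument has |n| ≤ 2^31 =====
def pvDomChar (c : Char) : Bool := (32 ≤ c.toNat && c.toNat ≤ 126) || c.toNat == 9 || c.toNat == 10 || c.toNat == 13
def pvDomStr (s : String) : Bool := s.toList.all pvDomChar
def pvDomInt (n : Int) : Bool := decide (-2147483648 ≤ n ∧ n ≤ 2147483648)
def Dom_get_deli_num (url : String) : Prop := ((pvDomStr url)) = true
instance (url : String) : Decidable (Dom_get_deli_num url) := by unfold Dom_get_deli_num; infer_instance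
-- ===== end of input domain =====

-- B counts by deletion (strip the five delimiters via translate, subtract lengths)
-- instead of A's per-character counter loop with an inner delimiter scan.

-- ===== PORT A =====
def get_deli_num (url : String) : Int :=
  url.toList.foldl
    (fun count i =>
      (['-', '_', '?', '=', '&'] : List Char).foldl
        (fun c j => if i == j then c + 1 else c) count)
    0

-- ===== PORT B =====
-- translate with a deletion-only table is ported by hand as a filter dropping
-- exactly the mapped-to-None characters (exact for this table: it deletes the
-- five chars and leaves every other character unchanged).
def pvDeleteDelims (cs : List Char) : List Char :=
  cs.filter (fun c => !(c == '-' || c == '_' || c == '?' || c == '=' || c == '&'))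

def get_deli_num_alt (url : String) : Int :=
  (url.toList.length : Int) - ((pvDeleteDelims url.toList).length : Int)

-- ===== PRECONDITION & SPEC =====
def Spec_get_deli_num (url : String) (out : Int) : Prop := out = get_deli_num_alt url
instance (url : String) (out : Int) : Decidable (Spec_get_deli_num url out) := by unfold Spec_get_deli_num; infer_instance

-- ===== CLAIM (what is proved, stated in full; the proofs are below) =====
def Claim_equal_get_deli_num : Prop := ∀ (url : String), Dom_get_deli_num url → Spec_get_deli_num url (get_deli_num url)

-- ===== LEMMAS AND PROOFS =====

theorem pvStep (i : Char) (a : Int) :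
    (['-', '_', '?', '=', '&'] : List Char).foldl
      (fun c j => if i == j then c + 1 else c) a
    = a + (if (i == '-' || i == '_' || i == '?' || i == '=' || i == '&') then 1 else 0) := by
  simp only [List.foldl, beq_iff_eq, Bool.or_eq_true]
  split_ifs <;> simp_all

theorem pvFoldA (cs : List Char) (a : Int) :
    cs.foldl
      (fun count i =>
        (['-', '_', '?', '=', '&'] : List Char).foldl
          (fun c j => if i == j then c + 1 else c) count)
      a
    = a + (cs.length : Int) - ((pvDeleteDelims cs).length : Int) := by
  induction cs generalizing a with
  | nil => simp [pvDeleteDelims]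
  | cons h t ih =>
    rw [List.foldl_cons, pvStep, ih]
    simp only [pvDeleteDelims, List.filter_cons, List.length_cons]
    by_cases hd : (h == '-' || h == '_' || h == '?' || h == '=' || h == '&') = true
    · simp only [hd]
      simp
      omega
    · simp only [hd]
      simp
      have hlen : ((t.filter (fun c => !(c == '-' || c == '_' || c == '?' || c == '=' || c == '&'))).length : Int) ≤ (t.length : Int) := by
        exact_mod_cast List.length_filter_le _ t
      omega

-- ===== VERDICT (by name: the statement is the Claim_ definition above) =====
theorem get_deli_num_spec : Claim_equal_get_deli_num := by
  intro url _
  show get_deli_num url = get_deli_num_alt url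
  unfold get_deli_num get_deli_num_alt
  rw [pvFoldA]
  omega
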